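-- pv_equiv track=rewrite | github.com/FatGuyy/second-CSV | main.py | conditional
-- ===== SOURCE A (Python) =====
-- def conditional(F_col, check1, check2, input1, check3, input2):
--     ret_list = []
--
--     for i in F_col:
--         # Actual loop
--         if i == check1 or i == check2:
--             ret_list.append(input1)
--         elif i == check3:
--             ret_list.append(input2)
--         else:   # for empty cell
--             ret_list.append(None)
--
--     return ret_list
-- ===== SOURCE B (Python) =====
-- def conditional(F_col, check1, check2, input1, check3, input2):
--     # Staged layered-overwrite decomposition (no per-element if/elif chain):
--     # Stage 1: base layer from the check3 rule alone.
--     base = [input2 if i == check3 else None for i in F_col]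
--     # Stage 2: overlay the check1/check2 rule on top of the base layer
--     # (so it takes priority on collisions, matching A's or/elif order).
--     return [input1 if i == check1 or i == check2 else b for i, b in zip(F_col, base)]
-- ===== Notes on version B (the rewrite author's own statement) =====
-- stated objective: alternative
-- what changed: Replaces A's single loop with a per-element three-way if/elif/else chain by a staged layered-overwrite: a first pass builds a base layer from the check3 rule alone, and a second zip pass overlays the check1/check2 rule on top of it.
import Mathlib
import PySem

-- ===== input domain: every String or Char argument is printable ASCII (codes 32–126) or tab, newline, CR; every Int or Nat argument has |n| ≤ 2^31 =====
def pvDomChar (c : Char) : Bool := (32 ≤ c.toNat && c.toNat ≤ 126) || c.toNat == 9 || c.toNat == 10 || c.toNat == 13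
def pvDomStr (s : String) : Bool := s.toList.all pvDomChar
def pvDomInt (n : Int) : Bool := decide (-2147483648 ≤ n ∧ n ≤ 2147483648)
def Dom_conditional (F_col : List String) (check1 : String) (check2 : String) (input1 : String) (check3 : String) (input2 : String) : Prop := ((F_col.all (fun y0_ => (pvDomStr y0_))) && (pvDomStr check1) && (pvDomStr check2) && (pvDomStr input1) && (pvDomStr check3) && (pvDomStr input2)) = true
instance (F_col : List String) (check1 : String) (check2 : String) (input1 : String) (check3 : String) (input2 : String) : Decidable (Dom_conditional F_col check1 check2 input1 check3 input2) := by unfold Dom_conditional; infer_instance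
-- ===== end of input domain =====

-- B replaces A's single per-element if/elif/else loop by a staged layered-overwrite:
-- a first pass builds a base layer from the check3 rule, then a zip pass overlays the
-- check1/check2 rule on top (alternative decomposition, same cost).


-- ===== PORT A =====
def conditional (F_col : List String) (check1 : String) (check2 : String) (input1 : String) (check3 : String) (input2 : String) : List (Option String) :=
  F_col.foldl (fun ret_list i =>
    if i = check1 ∨ i = check2 then ret_list ++ [some input1]
    else if i = check3 then ret_list ++ [some input2]
    else ret_list ++ [none]) []

-- ===== PORT B =====
def conditional_alt (F_col : List String) (check1 : String) (check2 : String) (input1 : String) (check3 : String) (input2 : String) : List (Option String) :=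
  let base := F_col.map (fun i => if i = check3 then some input2 else none)
  List.zipWith (fun i b => if i = check1 ∨ i = check2 then some input1 else b) F_col base

-- ===== PRECONDITION & SPEC =====
def Spec_conditional (F_col : List String) (check1 : String) (check2 : String) (input1 : String) (check3 : String) (input2 : String) (out : List (Option String)) : Prop := out = conditional_alt F_col check1 check2 input1 check3 input2
instance (F_col : List String) (check1 : String) (check2 : String) (input1 : String) (check3 : String) (input2 : String) (out : List (Option String)) : Decidable (Spec_conditional F_col check1 check2 input1 check3 input2 out) := by unfold Spec_conditional; infer_instance

-- ===== CLAIM (what is proved, stated in full; the proofs are below) =====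
def Claim_equal_conditional : Prop := ∀ (F_col : List String) (check1 : String) (check2 : String) (input1 : String) (check3 : String) (input2 : String), Dom_conditional F_col check1 check2 input1 check3 input2 → Spec_conditional F_col check1 check2 input1 check3 input2 (conditional F_col check1 check2 input1 check3 input2)

-- ===== LEMMAS AND PROOFS =====

-- zipping a list against a map of itself fuses into one map
theorem zipWith_map_self {α β γ : Type} (f : α → β → γ) (g : α → β) :
    ∀ (xs : List α), List.zipWith f xs (xs.map g) = xs.map (fun x => f x (g x)) := by
  intro xs
  induction xs with
  | nil => simp
  | cons x xs ih => simp [ih]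

-- the accumulator-carrying fold of A is the map of its branch chain
theorem foldl_chain (check1 check2 input1 check3 input2 : String) :
    ∀ (F_col : List String) (acc : List (Option String)),
    F_col.foldl (fun ret_list i =>
      if i = check1 ∨ i = check2 then ret_list ++ [some input1]
      else if i = check3 then ret_list ++ [some input2]
      else ret_list ++ [none]) acc
      = acc ++ F_col.map (fun i =>
          if i = check1 ∨ i = check2 then some input1
          else if i = check3 then some input2 else none) := by
  intro F_col
  induction F_col with
  | nil => simp
  | cons x xs ih =>
    intro acc
    simp only [List.foldl_cons, List.map_cons]
    rw [ih]
    split_ifs <;> simp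

-- ===== VERDICT (by name: the statement is the Claim_ definition above) =====
theorem conditional_spec : Claim_equal_conditional := by
  intro F_col check1 check2 input1 check3 input2 _
  unfold Spec_conditional conditional conditional_alt
  rw [foldl_chain, zipWith_map_self]
  simp
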